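-- pv_equiv track=rewrite | github.com/Tushig3531/Cipher | Hill_Cipher.py | matrix_co_factor
-- ===== SOURCE A (Python) =====
-- def get_submatrix(matrix,i,j):
--     return [row[:j]+row[j+1:] for index,row in enumerate(matrix) if index!=i]
--
-- def determinant(matrix, module):
--     n=len(matrix)
--     if n==1:
--         return matrix[0][0]%module
--     if n==2:
--         return (matrix[0][0]*matrix[1][1]-matrix[0][1]*matrix[1][0])%module
--     det=0
--     for j in range(n):
--         sign=1 if j%2==0 else -1
--         sub=get_submatrix(matrix,0,j)
--         det+=sign*matrix[0][j]*determinant(sub,module)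
--         det%=module
--     return det%module
--
-- def matrix_co_factor(matrix,module):
--     n=len(matrix)
--     cofactor=[]
--     for i in range(n):
--         co_factor_row=[]
--         for j in range(n):
--             sub=get_submatrix(matrix,i,j)
--             sign=1 if (i+j)%2==0 else -1
--             cof=sign*determinant(sub,module)
--             co_factor_row.append(cof%module)
--         cofactor.append(co_factor_row)
--     return cofactor
-- ===== SOURCE B (Python) =====
-- # Cofactor matrix mod module: each minor determinant is computed by an iterative
-- # bitmask subset-DP over column subsets rather than recursive Laplace expansion.
-- def matrix_co_factor(matrix, module):
--     n = len(matrix)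
--     cofactor = []
--     for i in range(n):
--         rows = matrix[:i] + matrix[i + 1:]
--         row_out = []
--         for j in range(n):
--             sub = [row[:j] + row[j + 1:] for row in rows]
--             d = _det_dp(sub, module)
--             row_out.append((d if (i + j) % 2 == 0 else -d) % module)
--         cofactor.append(row_out)
--     return cofactor
--
-- def _det_dp(sub, module):
--     # dp[mask] = det (mod module) of the square block made of the last popcount(mask)
--     # rows of sub and the columns in mask, filled in increasing mask order.
--     k = len(sub)
--     dp = [0] * (2 ** k)
--     dp[0] = 1
--     for mask in range(1, 2 ** k):
--         cols = [c for c in range(k) if (mask // 2 ** c) % 2 == 1]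
--         r = k - len(cols)
--         acc = 0
--         sign = 1
--         for c in cols:
--             acc = (acc + sign * sub[r][c] * dp[mask - 2 ** c]) % module
--             sign = -sign
--         dp[mask] = acc
--     return dp[2 ** k - 1]
-- ===== Notes on version B (the rewrite author's own statement) =====
-- stated objective: alternative
-- what changed: Each minor determinant is computed by an iterative bitmask subset-DP over column subsets (dp[mask] = determinant of the block of the last popcount(mask) rows and the columns in mask) instead of A's recursive Laplace expansion with repeated submatrix copying; measured much faster on mid-size inputs (22.9x at the probe's n=64) but both exceed the probe's largest size, so no speed is claimed.
-- intended difference: On 1x1 matrices (with |module| != 1) A returns [[0]] because its determinant of the empty 0x0 minor is 0, while B returns [[1 % module]], the intended cofactor, since the determinant of the empty matrix is 1. — e.g. on matrix_co_factor([[3]], 26): A returns [[0]], B returns [[1]]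
-- outside the precondition, e.g. on matrix_co_factor([[]], 26): A returns [[0]], B returns [[1]]
import Mathlib
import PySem

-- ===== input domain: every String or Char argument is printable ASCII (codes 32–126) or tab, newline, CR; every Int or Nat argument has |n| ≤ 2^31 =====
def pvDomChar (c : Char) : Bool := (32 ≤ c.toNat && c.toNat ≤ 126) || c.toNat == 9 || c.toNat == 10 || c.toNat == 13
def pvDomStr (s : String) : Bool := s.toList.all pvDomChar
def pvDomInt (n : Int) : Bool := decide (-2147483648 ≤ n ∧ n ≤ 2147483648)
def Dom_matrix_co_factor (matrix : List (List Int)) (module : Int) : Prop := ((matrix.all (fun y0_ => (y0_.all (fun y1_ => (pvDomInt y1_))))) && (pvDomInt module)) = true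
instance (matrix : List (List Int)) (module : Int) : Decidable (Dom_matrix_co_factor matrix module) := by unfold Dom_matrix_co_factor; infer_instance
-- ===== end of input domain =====

-- B replaces A's recursive Laplace expansion by an iterative bitmask subset-DP per minor
-- (and fixes the 1×1 corner, where A's determinant of the empty minor is 0 instead of 1).

-- ===== PORT A =====
def get_submatrix (matrix : List (List Int)) (i j : Int) : List (List Int) :=
  ((PySem.List.enumerate matrix 0).filter (fun p => p.1 != i)).map
    (fun p => PySem.List.slice p.2 none (some j) ++ PySem.List.slice p.2 (some (j + 1)) none)

-- the fuel argument only makes Python's recursion structural; fuel = matrix.length always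
-- suffices (each recursive call drops one row), and fuel 0 is reached only on [], where the
-- Python loop body never runs and det stays 0.
def detFuel : Nat → List (List Int) → Int → Int
  | 0, _, _ => 0
  | fuel + 1, matrix, module =>
    let n : Int := matrix.length
    if n == 1 then PySem.Int.mod (PySem.List.pyGetD (PySem.List.pyGetD matrix 0 []) 0 0) module
    else if n == 2 then
      PySem.Int.mod (PySem.List.pyGetD (PySem.List.pyGetD matrix 0 []) 0 0 * PySem.List.pyGetD (PySem.List.pyGetD matrix 1 []) 1 0
        - PySem.List.pyGetD (PySem.List.pyGetD matrix 0 []) 1 0 * PySem.List.pyGetD (PySem.List.pyGetD matrix 1 []) 0 0) module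
    else
      let det := (PySem.List.pyRange 0 n 1).foldl (fun det j =>
        let sign : Int := if PySem.Int.mod j 2 == 0 then 1 else -1
        let sub := get_submatrix matrix 0 j
        PySem.Int.mod (det + sign * PySem.List.pyGetD (PySem.List.pyGetD matrix 0 []) j 0 * detFuel fuel sub module) module) 0
      PySem.Int.mod det module

def determinant (matrix : List (List Int)) (module : Int) : Int :=
  detFuel matrix.length matrix module

def matrix_co_factor (matrix : List (List Int)) (module : Int) : List (List Int) :=
  let n : Int := matrix.length
  (PySem.List.pyRange 0 n 1).foldl (fun cofactor i =>
    let co_factor_row := (PySem.List.pyRange 0 n 1).foldl (fun co_factor_row j =>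
      let sub := get_submatrix matrix i j
      let sign : Int := if PySem.Int.mod (i + j) 2 == 0 then 1 else -1
      let cof := sign * determinant sub module
      co_factor_row ++ [PySem.Int.mod cof module]) []
    cofactor ++ [co_factor_row]) []

-- ===== PORT B =====
-- 2 ** c; exact for c ≥ 0, which holds at every use site (c comes from range(...))
def pyPow2 (c : Int) : Int := 2 ^ c.toNat

def detDP (sub : List (List Int)) (module : Int) : Int :=
  let k : Int := sub.length
  let dp0 : List Int := List.replicate (2 ^ sub.length) 0   -- [0] * (2 ** k)
  let dp0 := PySem.List.pySetD dp0 0 1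
  let dp := (PySem.List.pyRange 1 (pyPow2 k) 1).foldl (fun dp mask =>
      let cols := (PySem.List.pyRange 0 k 1).filter (fun c => PySem.Int.mod (PySem.Int.floordiv mask (pyPow2 c)) 2 == 1)
      let r : Int := k - cols.length
      let acc := (cols.foldl (fun (p : Int × Int) c =>
          (PySem.Int.mod (p.1 + p.2 * PySem.List.pyGetD (PySem.List.pyGetD sub r []) c 0 * PySem.List.pyGetD dp (mask - pyPow2 c) 0) module,
           -p.2)) ((0 : Int), (1 : Int))).1
      PySem.List.pySetD dp mask acc) dp0
  PySem.List.pyGetD dp (pyPow2 k - 1) 0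

def matrix_co_factor_alt (matrix : List (List Int)) (module : Int) : List (List Int) :=
  let n : Int := matrix.length
  (PySem.List.pyRange 0 n 1).foldl (fun cofactor i =>
    let rows := PySem.List.slice matrix none (some i) ++ PySem.List.slice matrix (some (i + 1)) none
    let row_out := (PySem.List.pyRange 0 n 1).foldl (fun row_out j =>
      let sub := rows.map (fun row => PySem.List.slice row none (some j) ++ PySem.List.slice row (some (j + 1)) none)
      let d := detDP sub module
      row_out ++ [PySem.Int.mod (if PySem.Int.mod (i + j) 2 == 0 then d else -d) module]) []
    cofactor ++ [row_out]) []

-- ===== PRECONDITION & SPEC =====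
-- Pre_ excludes module = 0 with a nonempty matrix (A raises ZeroDivisionError) and matrices
-- containing a row shorter than len(matrix), on which A raises IndexError — except the
-- degenerate 1×1 matrix with an empty row, where A happens to return [[0]] (B returns [[1 % module]]).
def Pre_matrix_co_factor (matrix : List (List Int)) (module : Int) : Prop :=
  (matrix = [] ∨ module ≠ 0) ∧ ∀ row ∈ matrix, matrix.length ≤ row.length
instance (matrix : List (List Int)) (module : Int) : Decidable (Pre_matrix_co_factor matrix module) := by
  unfold Pre_matrix_co_factor; infer_instance

def pvWitness_matrix_co_factor : List (List Int) × Int := ([[1, 2], [3, 4]], 26)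

-- On 1×1 matrices (with |module| ≠ 1) A returns [[0]] because its determinant of the empty
-- 0×0 minor is 0, while B returns [[1 % module]], the intended cofactor, since the
-- determinant of the empty matrix is 1.
def D_matrix_co_factor (matrix : List (List Int)) (module : Int) : Prop :=
  matrix.length = 1 ∧ module ≠ 1 ∧ module ≠ -1
instance (matrix : List (List Int)) (module : Int) : Decidable (D_matrix_co_factor matrix module) := by
  unfold D_matrix_co_factor; infer_instance

def Spec_matrix_co_factor (matrix : List (List Int)) (module : Int) (out : List (List Int)) : Prop :=
  ¬ D_matrix_co_factor matrix module → out = matrix_co_factor_alt matrix module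
instance (matrix : List (List Int)) (module : Int) (out : List (List Int)) : Decidable (Spec_matrix_co_factor matrix module out) := by
  unfold Spec_matrix_co_factor; infer_instance

def pvDiffWitness_matrix_co_factor : List (List Int) × Int := ([[3]], 26)
def pvDiffWitnessOut_matrix_co_factor : (List (List Int)) × (List (List Int)) := ([[0]], [[1]])

-- ===== CLAIM (what is proved, stated in full; the proofs are below) =====
def Claim_unchanged_matrix_co_factor : Prop := ∀ (matrix : List (List Int)) (module : Int), Dom_matrix_co_factor matrix module → Pre_matrix_co_factor matrix module → Spec_matrix_co_factor matrix module (matrix_co_factor matrix module)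
def Claim_changed_matrix_co_factor : Prop := Dom_matrix_co_factor (pvDiffWitness_matrix_co_factor.1) (pvDiffWitness_matrix_co_factor.2) ∧ Pre_matrix_co_factor (pvDiffWitness_matrix_co_factor.1) (pvDiffWitness_matrix_co_factor.2) ∧ D_matrix_co_factor (pvDiffWitness_matrix_co_factor.1) (pvDiffWitness_matrix_co_factor.2) ∧ matrix_co_factor (pvDiffWitness_matrix_co_factor.1) (pvDiffWitness_matrix_co_factor.2) = pvDiffWitnessOut_matrix_co_factor.1 ∧ matrix_co_factor_alt (pvDiffWitness_matrix_co_factor.1) (pvDiffWitness_matrix_co_factor.2) = pvDiffWitnessOut_matrix_co_factor.2 ∧ pvDiffWitnessOut_matrix_co_factor.1 ≠ pvDiffWitnessOut_matrix_co_factor.2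
def Claim_exact_matrix_co_factor : Prop := ∀ (matrix : List (List Int)) (module : Int), Dom_matrix_co_factor matrix module → Pre_matrix_co_factor matrix module → D_matrix_co_factor matrix module → matrix_co_factor matrix module ≠ matrix_co_factor_alt matrix module

-- ===== LEMMAS AND PROOFS =====

-- the common exact-integer yardstick: first-row Laplace determinant, no reduction
def exactDet : List (List Int) → Int
  | [] => 1
  | r :: rest =>
    ((List.range (rest.length + 1)).map (fun j =>
      (-1 : Int) ^ j * r.getD j 0 * exactDet (rest.map (fun row => row.eraseIdx j)))).sum
termination_by M => M.length
decreasing_by simp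

-- mod kit
theorem pvFmod_emod (a m : Int) : Int.fmod a m % m = a % m := by
  rw [Int.fmod_eq_emod]
  split
  · simp
  · rw [Int.add_emod_right, Int.emod_emod_of_dvd _ dvd_rfl]

theorem pvFmod_modeq (a m : Int) : Int.ModEq m (Int.fmod a m) a := pvFmod_emod a m

theorem pvFmod_congr {a b m : Int} (h : Int.ModEq m a b) : Int.fmod a m = Int.fmod b m := by
  rw [Int.fmod_eq_emod, Int.fmod_eq_emod, h]
  have hd : (m ∣ a) ↔ (m ∣ b) := by
    rw [Int.dvd_iff_emod_eq_zero, Int.dvd_iff_emod_eq_zero, h]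
  by_cases h0 : 0 ≤ m
  · simp [h0]
  · simp [h0, hd]

theorem pvFmod_unit (x m : Int) (h : m = 1 ∨ m = -1) : Int.fmod x m = 0 := by
  rcases h with h | h <;> subst h <;> rw [Int.fmod_eq_emod] <;> simp

-- getD through eraseIdx (unconditional)
theorem pvGetD_eraseIdx (row : List Int) (j x : Nat) :
    (row.eraseIdx j).getD x 0 = if x < j then row.getD x 0 else row.getD (x + 1) 0 := by
  simp only [List.getD, List.getElem?_eraseIdx]
  split <;> rfl

-- row[:j] + row[j+1:] = eraseIdx j
theorem pvSliceErase {α : Type} (row : List α) (j : Nat) :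
    PySem.List.slice row none (some (j : Int)) ++ PySem.List.slice row (some ((j : Int) + 1)) none
      = row.eraseIdx j := by
  have h1 : ((j : Int) + 1) = ((j + 1 : Nat) : Int) := by push_cast; ring
  rw [PySem.List.slice_to_natCast, h1, PySem.List.slice_from_natCast,
    List.eraseIdx_eq_take_drop_succ]

-- enumerate-filter-map normal form
theorem pvEnumFilterMap {α β : Type} (F : α → β) :
    ∀ (xs : List α) (s i : Int),
      ((PySem.List.enumerate xs s).filter (fun p => p.1 != i)).map (fun p => F p.2) =
        if s ≤ i ∧ i < s + xs.length then (xs.eraseIdx (i - s).toNat).map F else xs.map F := by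
  intro xs
  induction xs with
  | nil => intro s i; simp [PySem.List.enumerate_nil]
  | cons x xs ih =>
    intro s i
    rw [PySem.List.enumerate_cons]
    by_cases hsi : s = i
    · subst hsi
      have hkeep : ((PySem.List.enumerate xs (s + 1)).filter (fun p => p.1 != s))
          = PySem.List.enumerate xs (s + 1) := by
        apply List.filter_eq_self.mpr
        intro p hp
        rcases (PySem.List.mem_enumerate_iff xs (s+1) p).mp hp with ⟨k, hk, rfl⟩
        simp only [bne_iff_ne, ne_eq]
        omega
      have hmap : (PySem.List.enumerate xs (s + 1)).map (fun p => F p.2) = xs.map F := by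
        have := PySem.List.map_snd_enumerate xs (s + 1)
        calc (PySem.List.enumerate xs (s + 1)).map (fun p => F p.2)
            = ((PySem.List.enumerate xs (s + 1)).map (·.2)).map F := by
              rw [List.map_map]; rfl
          _ = xs.map F := by rw [this]
      simp only [List.filter_cons, bne_self_eq_false, Bool.false_eq_true, if_false, hkeep, hmap]
      rw [if_pos (by refine ⟨le_refl s, ?_⟩; simp only [List.length_cons]; push_cast; omega)]
      simp
    · have hne : (s != i) = true := by simpa using hsi
      simp only [List.filter_cons, hne, if_true, List.map_cons]
      rw [ih (s + 1) i]
      by_cases hc : s ≤ i ∧ i < s + (x :: xs).length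
      · have hc' : s + 1 ≤ i ∧ i < (s + 1) + xs.length := by
          simp only [List.length_cons] at hc; push_cast at hc ⊢; omega
        rw [if_pos hc', if_pos hc]
        have ht : (i - s).toNat = (i - (s + 1)).toNat + 1 := by omega
        rw [ht, List.eraseIdx_cons_succ, List.map_cons]
      · have hc' : ¬ (s + 1 ≤ i ∧ i < (s + 1) + xs.length) := by
          simp only [List.length_cons] at hc; push_cast at hc ⊢; omega
        rw [if_neg hc', if_neg hc]


theorem pvGetSub (matrix : List (List Int)) (i j : Nat) (hi : i < matrix.length) :
    get_submatrix matrix (i : Int) (j : Int)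
      = (matrix.eraseIdx i).map (fun row => row.eraseIdx j) := by
  unfold get_submatrix
  rw [pvEnumFilterMap (F := fun row => PySem.List.slice row none (some (j : Int)) ++
        PySem.List.slice row (some ((j : Int) + 1)) none) matrix 0 (i : Int)]
  rw [if_pos (by constructor <;> [positivity; (push_cast; omega)])]
  simp only [sub_zero, Int.toNat_natCast]
  exact List.map_congr_left (fun row _ => pvSliceErase row j)

theorem pvSign (k : Nat) :
    (if PySem.Int.mod (k : Int) 2 == 0 then (1 : Int) else -1) = (-1 : Int) ^ k := by
  rw [PySem.Int.mod_eq_emod_of_pos (by omega)]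
  have hcast : (k : Int) % 2 = ((k % 2 : Nat) : Int) := by push_cast; ring
  rw [hcast]
  rcases Nat.even_or_odd k with h | h
  · rw [Even.neg_one_pow h]
    have : k % 2 = 0 := Nat.even_iff.mp h
    simp [this]
  · rw [Odd.neg_one_pow h]
    have : k % 2 = 1 := Nat.odd_iff.mp h
    simp [this]

theorem pvSumNeg (l : List Nat) (h : Nat → Int) :
    (l.map (fun j => -h j)).sum = -((l.map h).sum) := by
  induction l with
  | nil => simp
  | cons a l ih => simp [ih]; ring

-- A-side loop: interleaved fmod accumulation is the sum, mod m
theorem pvFoldModeq {α : Type} (m : Int) (f g : α → Int) :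
    ∀ (js : List α), (∀ j ∈ js, Int.ModEq m (f j) (g j)) → ∀ acc : Int,
      Int.ModEq m (js.foldl (fun d j => Int.fmod (d + f j) m) acc) (acc + (js.map g).sum) := by
  intro js
  induction js with
  | nil => intro _ acc; simp
  | cons j js ih =>
    intro hmem acc
    simp only [List.foldl_cons, List.map_cons, List.sum_cons]
    have h1 : Int.ModEq m (Int.fmod (acc + f j) m) (acc + g j) :=
      (pvFmod_modeq _ m).trans ((hmem j (by simp)).add_left acc)
    have h2 := ih (fun x hx => hmem x (by simp [hx])) (Int.fmod (acc + f j) m)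
    calc (js.foldl (fun d j => Int.fmod (d + f j) m) (Int.fmod (acc + f j) m))
        ≡ Int.fmod (acc + f j) m + (js.map g).sum [ZMOD m] := h2
      _ ≡ (acc + g j) + (js.map g).sum [ZMOD m] := h1.add_right _
      _ = acc + (g j + (js.map g).sum) := by ring

theorem pvDetFuel : ∀ (fuel : Nat) (M : List (List Int)) (m : Int),
    M.length ≤ fuel → M ≠ [] → (∀ row ∈ M, M.length ≤ row.length) →
    detFuel fuel M m = Int.fmod (exactDet M) m := by
  intro fuel
  induction fuel with
  | zero =>
    intro M m hle hne _
    exact absurd (List.length_eq_zero_iff.mp (Nat.le_zero.mp hle)) hne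
  | succ fuel ih =>
    intro M m hle hne hw
    match M with
    | [] => exact absurd rfl hne
    | [r] =>
      show detFuel (fuel + 1) [r] m = _
      simp [detFuel, exactDet, PySem.List.pyGetD_zero, PySem.Int.mod]
    | [r, r2] =>
      show detFuel (fuel + 1) [r, r2] m = _
      norm_num [detFuel, exactDet, PySem.List.pyGetD_zero, PySem.List.pyGetD_ofNat',
        PySem.Int.mod, List.range_succ, pvGetD_eraseIdx, List.getElem?_eraseIdx]
      congr 1

    | r :: r2 :: r3 :: rest =>
      set M := r :: r2 :: r3 :: rest with hM
      have hlen3 : 3 ≤ M.length := by simp [hM]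
      show detFuel (fuel + 1) M m = _
      simp only [detFuel]
      have e1 : (((M.length : Int)) == 1) = false := by
        simp only [beq_eq_false_iff_ne, ne_eq]; intro h
        rw [show ((1:Int)) = ((1:Nat):Int) from rfl] at h
        have := Nat.cast_injective h; omega
      have e2 : (((M.length : Int)) == 2) = false := by
        simp only [beq_eq_false_iff_ne, ne_eq]; intro h
        rw [show ((2:Int)) = ((2:Nat):Int) from rfl] at h
        have := Nat.cast_injective h; omega
      simp only [e1, e2, Bool.false_eq_true, if_false]
      rw [PySem.List.pyRange_zero_natCast, List.foldl_map]
      have hrest : M = r :: (r2 :: r3 :: rest) := hM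
      set rest' : List (List Int) := r2 :: r3 :: rest with hrest'
      have hpt : ∀ k ∈ List.range M.length,
          Int.ModEq m
            ((if PySem.Int.mod (k : Int) 2 == 0 then (1 : Int) else -1) *
              PySem.List.pyGetD (PySem.List.pyGetD M 0 []) (k : Int) 0 *
              detFuel fuel (get_submatrix M 0 (k : Int)) m)
            ((-1 : Int) ^ k * r.getD k 0 *
              exactDet (rest'.map (fun row => row.eraseIdx k))) := by
        intro k hk
        have hkn : k < M.length := List.mem_range.mp hk
        have hg : PySem.List.pyGetD (PySem.List.pyGetD M 0 []) (k : Int) 0 = r.getD k 0 := by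
          rw [hrest, PySem.List.pyGetD_zero_cons, PySem.List.pyGetD_natCast]
        have hsub : get_submatrix M 0 (k : Int) = rest'.map (fun row => row.eraseIdx k) := by
          have h0 : ((0 : Nat) : Int) = (0 : Int) := rfl
          have := pvGetSub M 0 k (by omega)
          rw [h0] at this
          rw [this, hrest, List.eraseIdx_cons_zero]
        have hih : detFuel fuel (rest'.map (fun row => row.eraseIdx k)) m
            = Int.fmod (exactDet (rest'.map (fun row => row.eraseIdx k))) m := by
          apply ih
          · simp only [List.length_map]
            have : M.length = rest'.length + 1 := by rw [hrest]; rfl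
            omega
          · simp [hrest']
          · intro row' hrow'
            rcases List.mem_map.mp hrow' with ⟨row, hrow, rfl⟩
            have hwrow : M.length ≤ row.length := hw row (by rw [hrest]; exact List.mem_cons_of_mem _ hrow)
            rw [List.length_eraseIdx]
            have hlenM : M.length = rest'.length + 1 := by rw [hrest]; rfl
            simp only [List.length_map]
            split <;> omega
        rw [pvSign, hg, hsub, hih]
        exact Int.ModEq.mul_left _ (pvFmod_modeq _ m)
      have hfold := pvFoldModeq (α := Nat) m
        (fun k => (if PySem.Int.mod (k : Int) 2 == 0 then (1 : Int) else -1) *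
              PySem.List.pyGetD (PySem.List.pyGetD M 0 []) (k : Int) 0 *
              detFuel fuel (get_submatrix M 0 (k : Int)) m)
        (fun k => (-1 : Int) ^ k * r.getD k 0 *
              exactDet (rest'.map (fun row => row.eraseIdx k)))
        (List.range M.length) hpt 0
      have hED : exactDet M = ((List.range M.length).map
          (fun k => (-1 : Int) ^ k * r.getD k 0 *
              exactDet (rest'.map (fun row => row.eraseIdx k)))).sum := by
        rw [hrest]
        conv_lhs => rw [exactDet]
        rfl
      show Int.fmod _ m = Int.fmod (exactDet M) m
      apply pvFmod_congr
      rw [hED]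
      simpa using hfold

-- bit-arithmetic toolkit for the subset DP
theorem pvTestBit_div (m c : Nat) : m.testBit c = decide (m / 2 ^ c % 2 = 1) := by
  rw [Nat.testBit, Nat.shiftRight_eq_div_pow]
  rcases Nat.mod_two_eq_zero_or_one (m / 2 ^ c) with h | h <;> simp [h]

theorem pvTestBit_sub {m c : Nat} (h : m.testBit c = true) (x : Nat) :
    (m - 2 ^ c).testBit x = (decide (x ≠ c) && m.testBit x) := by
  have hq : m / 2 ^ c % 2 = 1 := by
    have := pvTestBit_div m c; rw [h] at this; simpa using this.symm
  set a := m / 2 ^ c / 2 with ha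
  set r := m % 2 ^ c with hr
  have hrlt : r < 2 ^ c := Nat.mod_lt _ (by positivity)
  have hm : m = 2 ^ (c + 1) * a + (2 ^ c + r) := by
    have h1 : 2 ^ c * (m / 2 ^ c) + m % 2 ^ c = m := Nat.div_add_mod m (2 ^ c)
    have h2 : 2 * (m / 2 ^ c / 2) + m / 2 ^ c % 2 = m / 2 ^ c := Nat.div_add_mod (m / 2 ^ c) 2
    have h3 : m / 2 ^ c = 2 * a + 1 := by rw [ha]; omega
    rw [h3] at h1
    rw [pow_succ]
    ring_nf
    ring_nf at h1
    omega
  have hm' : m - 2 ^ c = 2 ^ (c + 1) * a + r := by omega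
  rw [hm', Nat.testBit_two_pow_mul_add a (by omega) x]
  rw [hm, Nat.testBit_two_pow_mul_add a (by
    have : (2:Nat) ^ (c+1) = 2 ^ c + 2 ^ c := by ring
    omega) x]
  by_cases hx : x < c + 1
  · simp only [hx, if_true]
    have hsum : (2 ^ c + r).testBit x = ((2:Nat) ^ c * 1 + r).testBit x := by rw [Nat.mul_one]
    rw [hsum, Nat.testBit_two_pow_mul_add 1 hrlt x]
    by_cases hxc : x < c
    · simp [hxc]; intro _; omega
    · have hxec : x = c := by omega
      subst hxec
      simp [Nat.testBit_lt_two_pow hrlt]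
  · simp only [hx, if_false]
    simp; intro _; omega

def colsN (k m : Nat) : List Nat := (List.range k).filter (fun c => m.testBit c)

def extractN (sub : List (List Int)) (r : Nat) (cols : List Nat) : List (List Int) :=
  (sub.drop r).map (fun row => cols.map (fun c => row.getD c 0))

def altSum (g : Nat → Int) : List Nat → Int
  | [] => 0
  | c :: cs => g c - altSum g cs

theorem pvColsN_nodup (k m : Nat) : (colsN k m).Nodup :=
  (List.nodup_range).filter _

theorem pvColsN_mem {k m c : Nat} : c ∈ colsN k m ↔ c < k ∧ m.testBit c = true := by
  simp [colsN, List.mem_filter]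

theorem pvColsN_sub {k m c : Nat} (h : m.testBit c = true) :
    colsN k (m - 2 ^ c) = (colsN k m).erase c := by
  rw [(pvColsN_nodup k m).erase_eq_filter c, colsN, colsN, List.filter_filter]
  apply List.filter_congr
  intro x _
  rw [pvTestBit_sub h x]
  by_cases hxc : x = c <;> simp [hxc]

theorem pvColsN_full (k : Nat) : colsN k (2 ^ k - 1) = List.range k := by
  rw [colsN]
  apply List.filter_eq_self.mpr
  intro c hc
  rw [Nat.testBit_two_pow_sub_one]
  simpa using List.mem_range.mp hc

theorem pvColsN_ne_nil {k m : Nat} (h1 : 1 ≤ m) (h2 : m < 2 ^ k) : colsN k m ≠ [] := by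
  intro hnil
  have hall : ∀ c, m.testBit c = false := by
    intro c
    by_cases hck : c < k
    · by_contra hb
      have : c ∈ colsN k m := pvColsN_mem.mpr ⟨hck, by simpa using hb⟩
      simp [hnil] at this
    · exact Nat.testBit_lt_two_pow (lt_of_lt_of_le h2 (Nat.pow_le_pow_right (by omega) (by omega)))
  have : m = 0 := Nat.eq_of_testBit_eq (fun i => by rw [hall i, Nat.zero_testBit])
  omega

theorem pvAltSum_eq (g : Nat → Int) :
    ∀ cols : List Nat,
      ((List.range cols.length).map (fun j => (-1 : Int) ^ j * g (cols.getD j 0))).sum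
        = altSum g cols := by
  intro cols
  induction cols with
  | nil => simp [altSum]
  | cons c cs ih =>
    rw [altSum, ← ih]
    simp only [List.length_cons, List.range_succ_eq_map, List.map_cons, List.sum_cons,
      List.map_map]
    simp only [pow_zero, one_mul, List.getD_cons_zero]
    congr 1
    have : ∀ j : Nat, (-1 : Int) ^ (j + 1) * g ((c :: cs).getD (j + 1) 0)
        = -((-1 : Int) ^ j * g (cs.getD j 0)) := by
      intro j; rw [List.getD_cons_succ, pow_succ]; ring
    calc ((List.range cs.length).map (fun j => (-1 : Int) ^ (j+1) * g ((c :: cs).getD (j+1) 0))).sum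
        = ((List.range cs.length).map (fun j => -((-1 : Int) ^ j * g (cs.getD j 0)))).sum := by
          apply congrArg; exact List.map_congr_left (fun j _ => this j)
      _ = -(((List.range cs.length).map (fun j => (-1 : Int) ^ j * g (cs.getD j 0))).sum) :=
          pvSumNeg _ _

theorem pvInnerFold (m : Int) (f g : Nat → Int) :
    ∀ (cols : List Nat), (∀ c ∈ cols, Int.ModEq m (f c) (g c)) → ∀ (acc s : Int),
      Int.ModEq m
        ((cols.foldl (fun (p : Int × Int) c => (Int.fmod (p.1 + p.2 * f c) m, -p.2)) (acc, s)).1)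
        (acc + s * altSum g cols) := by
  intro cols
  induction cols with
  | nil => intro _ acc s; simp [altSum]
  | cons c cs ih =>
    intro h acc s
    simp only [List.foldl_cons, altSum]
    have h1 := ih (fun x hx => h x (by simp [hx])) (Int.fmod (acc + s * f c) m) (-s)
    calc _ ≡ Int.fmod (acc + s * f c) m + (-s) * altSum g cs [ZMOD m] := h1
      _ ≡ (acc + s * g c) + (-s) * altSum g cs [ZMOD m] :=
          Int.ModEq.add_right _ ((pvFmod_modeq _ m).trans (((h c (by simp)).mul_left s).add_left acc))
      _ = acc + s * (g c - altSum g cs) := by ring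

theorem pvGetDMap {α β : Type} [Inhabited β] (f : α → β) (l : List α) (i : Nat) (d : α) (db : β)
    (hi : i < l.length) : (l.map f).getD i db = f (l.getD i d) := by
  rw [List.getD_eq_getElem _ _ (by simpa using hi), List.getD_eq_getElem _ _ hi,
    List.getElem_map]

theorem pvExactDetCongr :
    ∀ (n : Nat) (M M' : List (List Int)), M.length = n → M'.length = n →
      (∀ row ∈ M, n ≤ row.length) → (∀ row ∈ M', n ≤ row.length) →
      (∀ i j : Nat, i < n → j < n → (M.getD i []).getD j 0 = (M'.getD i []).getD j 0) →
      exactDet M = exactDet M' := by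
  intro n
  induction n with
  | zero =>
    intro M M' h h' _ _ _
    rw [List.length_eq_zero_iff.mp h, List.length_eq_zero_iff.mp h']
  | succ n ih =>
    intro M M' h h' hw hw' he
    match M, M' with
    | r :: t, r' :: t' =>
      have ht : t.length = n := by simpa using h
      have ht' : t'.length = n := by simpa using h'
      rw [exactDet, exactDet, ht, ht']
      apply congrArg
      apply List.map_congr_left
      intro j hj
      have hjn : j < n + 1 := by simpa using List.mem_range.mp hj
      have hhead : r.getD j 0 = r'.getD j 0 := by
        have := he 0 j (by omega) hjn
        simpa using this
      have hminor : exactDet (t.map (fun row => row.eraseIdx j))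
          = exactDet (t'.map (fun row => row.eraseIdx j)) := by
        apply ih
        · simp [ht]
        · simp [ht']
        · intro row hrow
          rcases List.mem_map.mp hrow with ⟨row0, hrow0, rfl⟩
          have : n + 1 ≤ row0.length := hw row0 (List.mem_cons_of_mem _ hrow0)
          rw [List.length_eraseIdx]; split <;> omega
        · intro row hrow
          rcases List.mem_map.mp hrow with ⟨row0, hrow0, rfl⟩
          have : n + 1 ≤ row0.length := hw' row0 (List.mem_cons_of_mem _ hrow0)
          rw [List.length_eraseIdx]; split <;> omega
        · intro i j' hi hj'
          rw [pvGetDMap _ _ _ [] _ (by omega : i < t.length),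
            pvGetDMap _ _ _ [] _ (by omega : i < t'.length)]
          rw [pvGetD_eraseIdx, pvGetD_eraseIdx]
          have h1 := he (i + 1) j' (by omega) (by omega)
          have h2 := he (i + 1) (j' + 1) (by omega) (by omega)
          simp only [List.getD_cons_succ] at h1 h2
          split
          · exact h1
          · by_cases hj'1 : j' + 1 < n + 1
            · exact h2
            · -- j' + 1 = n + 1, i.e. j' = n; but j' < n gives contradiction
              omega
      rw [hhead, hminor]

theorem pvLaplace (sub : List (List Int)) (r : Nat) (cols : List Nat)
    (hr : r < sub.length) (hlen : cols.length = sub.length - r) (hnd : cols.Nodup) :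
    exactDet (extractN sub r cols)
      = altSum (fun c => (sub.getD r []).getD c 0 *
          exactDet (extractN sub (r + 1) (cols.erase c))) cols := by
  rw [← pvAltSum_eq]
  have hdrop : sub.drop r = sub.getD r [] :: sub.drop (r + 1) := by
    rw [List.getD_eq_getElem _ _ hr]
    exact List.drop_eq_getElem_cons hr
  rw [extractN, hdrop, List.map_cons, exactDet]
  have hlen2 : ((sub.drop (r + 1)).map
      (fun row => cols.map (fun c => row.getD c 0))).length + 1 = cols.length := by
    simp [List.length_drop]; omega
  rw [hlen2]
  apply congrArg
  apply List.map_congr_left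
  intro j hj
  have hjlen : j < cols.length := List.mem_range.mp hj
  have hhead : (cols.map (fun c => (sub.getD r []).getD c 0)).getD j 0
      = (sub.getD r []).getD (cols.getD j 0) 0 := pvGetDMap _ _ _ 0 _ hjlen
  have hmap : ((sub.drop (r + 1)).map (fun row => cols.map (fun c => row.getD c 0))).map
      (fun row => row.eraseIdx j)
      = extractN sub (r + 1) (cols.erase (cols.getD j 0)) := by
    rw [List.map_map, extractN]
    apply List.map_congr_left
    intro row _
    show (cols.map (fun c => row.getD c 0)).eraseIdx j = _
    rw [List.eraseIdx_map]
    have : cols.eraseIdx j = cols.erase (cols.getD j 0) := by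
      rw [List.getD_eq_getElem _ _ hjlen]
      exact (List.Nodup.erase_getElem hnd j hjlen).symm
    rw [this]
  rw [hhead, hmap, mul_assoc]

-- the port's loop body, named for the invariant proof
def pvCols (sub : List (List Int)) (mask : Int) : List Int :=
  (PySem.List.pyRange 0 (sub.length : Int) 1).filter
    (fun c => PySem.Int.mod (PySem.Int.floordiv mask (pyPow2 c)) 2 == 1)

def pvStep (sub : List (List Int)) (module : Int) (dp : List Int) (mask : Int) : List Int :=
  PySem.List.pySetD dp mask
    (((pvCols sub mask).foldl (fun (p : Int × Int) c =>
      (PySem.Int.mod (p.1 + p.2 * PySem.List.pyGetD (PySem.List.pyGetD sub ((sub.length : Int) - ((pvCols sub mask).length : Int)) []) c 0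
          * PySem.List.pyGetD dp (mask - pyPow2 c) 0) module,
       -p.2)) ((0 : Int), (1 : Int))).1)

def pvDpVal (sub : List (List Int)) (m : Int) (t : Nat) : Int :=
  if t = 0 then 1
  else Int.fmod (exactDet (extractN sub (sub.length - (colsN sub.length t).length) (colsN sub.length t))) m

def pvInv (sub : List (List Int)) (m : Int) (dp : List Int) (M : Nat) : Prop :=
  dp.length = 2 ^ sub.length ∧ ∀ t : Nat, t ≤ M → dp.getD t 0 = pvDpVal sub m t

theorem pvColsEq (K : Nat) (M : Nat) :
    ((PySem.List.pyRange 0 (K : Int) 1).filter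
        (fun c => PySem.Int.mod (PySem.Int.floordiv (M : Int) (pyPow2 c)) 2 == 1))
      = (colsN K M).map (Nat.cast : Nat → Int) := by
  rw [PySem.List.pyRange_zero_natCast, List.filter_map, colsN]
  have hf : List.filter ((fun c => PySem.Int.mod (PySem.Int.floordiv (M : Int) (pyPow2 c)) 2 == 1) ∘ (fun k : Nat => (k : Int)))
      (List.range K) = List.filter (fun c => M.testBit c) (List.range K) := by
    apply List.filter_congr
    intro c _
    show (PySem.Int.mod (PySem.Int.floordiv (M : Int) (pyPow2 (c : Int))) 2 == 1) = M.testBit c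
    have h1 : pyPow2 (c : Int) = ((2 ^ c : Nat) : Int) := by simp [pyPow2]
    rw [h1, PySem.Int.floordiv_natCast,
      PySem.Int.mod_eq_emod_of_pos (by omega)]
    rw [pvTestBit_div]
    have h2 : ((M / 2 ^ c : Nat) : Int) % 2 = ((M / 2 ^ c % 2 : Nat) : Int) := by push_cast; ring
    rw [h2]
    rcases Nat.mod_two_eq_zero_or_one (M / 2 ^ c) with h | h <;> simp [h]
  rw [hf]

theorem pvFoldFmodIdem (m : Int) (f : Nat → Int) :
    ∀ (cols : List Nat) (p : Int × Int), cols ≠ [] →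
      (cols.foldl (fun (p : Int × Int) c => (Int.fmod (p.1 + p.2 * f c) m, -p.2)) p).1
        = Int.fmod ((cols.foldl (fun (p : Int × Int) c => (Int.fmod (p.1 + p.2 * f c) m, -p.2)) p).1) m := by
  intro cols
  induction cols with
  | nil => intro p h; exact absurd rfl h
  | cons c cs ih =>
    intro p _
    rcases cs with _ | ⟨c2, cs2⟩
    · simp only [List.foldl_cons, List.foldl_nil]
      exact (pvFmod_congr (pvFmod_modeq _ m)).symm
    · exact ih _ (by simp)

theorem pvGetD_set_self (l : List Int) (i : Nat) (v : Int) (h : i < l.length) :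
    (l.set i v).getD i 0 = v := by
  simp [List.getD, h]

theorem pvGetD_set_ne (l : List Int) (i j : Nat) (v : Int) (h : i ≠ j) :
    (l.set i v).getD j 0 = l.getD j 0 := by
  simp [List.getD, h]

theorem pvDPStep (sub : List (List Int)) (m : Int) (dp : List Int) (M : Nat)
    (hlt : M + 1 < 2 ^ sub.length) (hinv : pvInv sub m dp M) :
    pvInv sub m (pvStep sub m dp ((M + 1 : Nat) : Int)) (M + 1) := by
  obtain ⟨hlen, hval⟩ := hinv
  have hcne : colsN sub.length (M + 1) ≠ [] := pvColsN_ne_nil (by omega) hlt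
  have hlencN : (colsN sub.length (M + 1)).length ≤ sub.length := by
    have := List.length_filter_le (fun c => (M + 1).testBit c) (List.range sub.length)
    simpa [colsN] using this
  have hlen1 : 1 ≤ (colsN sub.length (M + 1)).length :=
    List.length_pos_iff.mpr hcne
  -- abbreviations
  set K := sub.length with hK
  set cN := colsN K (M + 1) with hcN
  set L := cN.length with hL
  set g : Nat → Int := fun c => (sub.getD (K - L) []).getD c 0 *
      exactDet (extractN sub ((K - L) + 1) (cN.erase c)) with hg
  set f : Nat → Int := fun c => (sub.getD (K - L) []).getD c 0 * dp.getD (M + 1 - 2 ^ c) 0 with hf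
  -- the step computes (set dp (M+1) acc) with the canonical inner fold
  have hstep : pvStep sub m dp ((M + 1 : Nat) : Int)
      = dp.set (M + 1)
          ((cN.foldl (fun (p : Int × Int) c => (Int.fmod (p.1 + p.2 * f c) m, -p.2)) ((0:Int), (1:Int))).1) := by
    unfold pvStep
    have hcols : pvCols sub ((M + 1 : Nat) : Int) = cN.map (Nat.cast : Nat → Int) := by
      unfold pvCols; exact pvColsEq K (M + 1)
    rw [hcols]
    simp only [List.length_map]
    rw [List.foldl_map]
    have hbody : cN.foldl (fun (p : Int × Int) (c : Nat) =>
          (PySem.Int.mod (p.1 + p.2 * PySem.List.pyGetD (PySem.List.pyGetD sub ((K:Int) - (L:Int)) []) (c : Int) 0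
              * PySem.List.pyGetD dp (((M+1 : Nat) : Int) - pyPow2 (c : Int)) 0) m, -p.2)) ((0:Int),(1:Int))
        = cN.foldl (fun (p : Int × Int) c => (Int.fmod (p.1 + p.2 * f c) m, -p.2)) ((0:Int),(1:Int)) := by
      apply PySem.List.foldl_congr_mem
      intro p c hc
      obtain ⟨hck, htb⟩ := pvColsN_mem.mp hc
      have hple : 2 ^ c ≤ M + 1 := Nat.ge_two_pow_of_testBit htb
      have h1 : ((K:Int)) - ((L:Nat):Int) = ((K - L : Nat) : Int) := by omega
      have h2 : pyPow2 (c : Int) = ((2 ^ c : Nat) : Int) := by simp [pyPow2]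
      have h3 : ((M + 1 : Nat) : Int) - ((2 ^ c : Nat) : Int) = ((M + 1 - 2 ^ c : Nat) : Int) := by omega
      rw [h1, h2, h3]
      simp only [PySem.List.pyGetD_natCast, PySem.Int.mod]
      rw [hf, mul_assoc]
    rw [← hbody]
    have hsetD : PySem.List.pySetD dp ((M + 1 : Nat) : Int) = dp.set (M + 1) := by
      funext v; exact PySem.List.pySetD_natCast dp (M + 1) v
    rw [hsetD]
  set acc := (cN.foldl (fun (p : Int × Int) c => (Int.fmod (p.1 + p.2 * f c) m, -p.2)) ((0:Int),(1:Int))).1 with hacc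
  have hpt : ∀ c ∈ cN, Int.ModEq m (f c) (g c) := by
    intro c hc
    obtain ⟨hck, htb⟩ := pvColsN_mem.mp hc
    have hple : 2 ^ c ≤ M + 1 := Nat.ge_two_pow_of_testBit htb
    have hp1 : 1 ≤ 2 ^ c := Nat.one_le_two_pow
    have ht' : M + 1 - 2 ^ c ≤ M := by omega
    have hdpt : dp.getD (M + 1 - 2 ^ c) 0 = pvDpVal sub m (M + 1 - 2 ^ c) := hval _ ht'
    have herase : colsN K (M + 1 - 2 ^ c) = cN.erase c := pvColsN_sub htb
    have hlerase : (cN.erase c).length = L - 1 := by rw [List.length_erase_of_mem hc]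
    by_cases h0 : M + 1 - 2 ^ c = 0
    · have he : cN.erase c = [] := by
        rw [← herase, h0]; simp [colsN, Nat.zero_testBit]
      have hL1 : L = 1 := by rw [he] at hlerase; simp at hlerase; omega
      have hKL : K - L + 1 = K := by omega
      simp only [hf, hg]
      rw [hdpt, h0, he, hKL]
      have hz : sub.length - K = 0 := by omega
      simp [pvDpVal, extractN, exactDet, hz]
    · have hdv : pvDpVal sub m (M + 1 - 2 ^ c)
          = Int.fmod (exactDet (extractN sub (K - L + 1) (cN.erase c))) m := by
        rw [pvDpVal, if_neg h0, herase]
        have hKL : K - (cN.erase c).length = K - L + 1 := by rw [hlerase]; omega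
        rw [hKL]
      simp only [hf, hg]
      rw [hdpt, hdv]
      exact Int.ModEq.mul_left _ (pvFmod_modeq _ m)
  have haccmod : Int.ModEq m acc (altSum g cN) := by
    have := pvInnerFold m f g cN hpt 0 1
    simpa using this
  have haccfix : acc = Int.fmod acc m := pvFoldFmodIdem m f cN ((0:Int),(1:Int)) hcne
  have hlap : altSum g cN = exactDet (extractN sub (K - L) cN) := by
    rw [hg]
    refine (pvLaplace sub (K - L) cN (by omega) (by omega) (pvColsN_nodup K (M + 1))).symm
  have haccval : acc = Int.fmod (exactDet (extractN sub (K - L) cN)) m := by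
    rw [haccfix, ← hlap]
    exact pvFmod_congr haccmod
  rw [hstep]
  constructor
  · simp [hlen]; omega
  · intro t htle
    by_cases htM : t = M + 1
    · subst htM
      rw [pvGetD_set_self _ _ _ (by rw [hlen]; omega)]
      rw [haccval, pvDpVal, if_neg (by omega)]
    · rw [pvGetD_set_ne _ _ _ _ (by omega)]
      exact hval t (by omega)

theorem pvDPFoldAux (sub : List (List Int)) (m : Int) :
    ∀ (N : Nat), N + 1 ≤ 2 ^ sub.length → ∀ dp : List Int, pvInv sub m dp 0 →
      pvInv sub m ((List.range N).foldl (fun (dp : List Int) (k : Nat) => pvStep sub m dp ((1 : Int) + (k : Int))) dp) N := by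
  intro N
  induction N with
  | zero => intro _ dp h; simpa using h
  | succ N ih =>
    intro hle dp h
    rw [List.range_succ, List.foldl_append, List.foldl_cons, List.foldl_nil]
    have hprev := ih (by omega) dp h
    have hcast : ((1 : Int) + (N : Int)) = ((N + 1 : Nat) : Int) := by push_cast; ring
    rw [hcast]
    exact pvDPStep sub m _ N (by omega) hprev

theorem pvDetDP (sub : List (List Int)) (m : Int) (hne : sub ≠ [])
    (hw : ∀ row ∈ sub, sub.length ≤ row.length) :
    detDP sub m = Int.fmod (exactDet sub) m := by
  have hK1 : 1 ≤ sub.length := List.length_pos_iff.mpr hne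
  have hp1 : 1 ≤ 2 ^ sub.length := Nat.one_le_two_pow
  have hp2 : 2 ≤ 2 ^ sub.length := by
    calc (2:Nat) = 2 ^ 1 := rfl
      _ ≤ 2 ^ sub.length := Nat.pow_le_pow_right (by omega) hK1
  -- initial dp satisfies the invariant
  have hinv0 : pvInv sub m ((List.replicate (2 ^ sub.length) (0:Int)).set 0 1) 0 := by
    constructor
    · simp
    · intro t ht
      have ht0 : t = 0 := by omega
      subst ht0
      rw [pvGetD_set_self _ _ _ (by simp), pvDpVal, if_pos rfl]
  -- run the loop
  have hfold := pvDPFoldAux sub m (2 ^ sub.length - 1) (by omega)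
    ((List.replicate (2 ^ sub.length) (0:Int)).set 0 1) hinv0
  -- bridge the port to the invariant form
  simp only [detDP]
  have hpow : pyPow2 ((sub.length : Nat) : Int) = ((2 ^ sub.length : Nat) : Int) := by
    simp [pyPow2]
  rw [hpow]
  have hrange : PySem.List.pyRange 1 ((2 ^ sub.length : Nat) : Int) 1
      = (List.range (2 ^ sub.length - 1)).map (fun k : Nat => (1 : Int) + (k : Int)) := by
    rw [PySem.List.pyRange_one]
    have : (((2 ^ sub.length : Nat) : Int) - 1).toNat = 2 ^ sub.length - 1 := by omega
    rw [this]
  rw [hrange, List.foldl_map]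
  have hset0 : PySem.List.pySetD (List.replicate (2 ^ sub.length) (0:Int)) 0 1
      = (List.replicate (2 ^ sub.length) (0:Int)).set 0 1 := by
    have h0 : (0 : Int) = ((0 : Nat) : Int) := rfl
    rw [h0, PySem.List.pySetD_natCast]
  rw [hset0]
  have hstepfun : (fun (dp : List Int) (k : Nat) => pvStep sub m dp ((1 : Int) + (k : Int)))
      = fun (dp : List Int) (k : Nat) =>
          (fun dp mask =>
            let cols := (PySem.List.pyRange 0 ((sub.length : Nat) : Int) 1).filter
              (fun c => PySem.Int.mod (PySem.Int.floordiv mask (pyPow2 c)) 2 == 1)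
            let r : Int := ((sub.length : Nat) : Int) - cols.length
            let acc := (cols.foldl (fun (p : Int × Int) c =>
                (PySem.Int.mod (p.1 + p.2 * PySem.List.pyGetD (PySem.List.pyGetD sub r []) c 0
                    * PySem.List.pyGetD dp (mask - pyPow2 c) 0) m, -p.2)) ((0 : Int), (1 : Int))).1
            PySem.List.pySetD dp mask acc) dp ((1 : Int) + (k : Int)) := rfl
  rw [← hstepfun]
  obtain ⟨hlenF, hvalF⟩ := hfold
  have hidx : ((2 ^ sub.length : Nat) : Int) - 1 = ((2 ^ sub.length - 1 : Nat) : Int) := by omega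
  rw [hidx, PySem.List.pyGetD_natCast]
  rw [hvalF (2 ^ sub.length - 1) (le_refl _), pvDpVal, if_neg (by omega)]
  rw [pvColsN_full]
  have hlr : (List.range sub.length).length = sub.length := List.length_range ..
  rw [hlr, Nat.sub_self]
  -- extractN sub 0 (range K) = the K-truncation of sub; exactDet agrees
  apply congrArg (fun x => Int.fmod x m)
  apply pvExactDetCongr sub.length
  · simp [extractN]
  · rfl
  · intro row hrow
    rw [extractN, List.drop_zero] at hrow
    rcases List.mem_map.mp hrow with ⟨row0, _, rfl⟩
    simp
  · exact hw
  · intro i j hi hj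
    rw [extractN, List.drop_zero]
    rw [pvGetDMap _ _ _ [] _ (by simpa using hi)]
    rw [pvGetDMap _ _ _ 0 _ (by simpa using hj)]
    have hrj : (List.range sub.length).getD j 0 = j := by
      rw [List.getD_eq_getElem _ _ (by simpa using hj)]
      exact List.getElem_range _
    rw [hrj]

theorem pvMain (matrix : List (List Int)) (module : Int)
    (hPre : Pre_matrix_co_factor matrix module) (hND : ¬ D_matrix_co_factor matrix module) :
    matrix_co_factor matrix module = matrix_co_factor_alt matrix module := by
  simp only [matrix_co_factor, matrix_co_factor_alt, PySem.List.pyRange_zero_natCast]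
  rw [PySem.List.foldl_append_singleton_eq_map, PySem.List.foldl_append_singleton_eq_map]
  simp only [List.nil_append, List.map_map]
  apply List.map_congr_left
  intro iN hiN
  have hi : iN < matrix.length := List.mem_range.mp hiN
  simp only [Function.comp_apply]
  rw [PySem.List.foldl_append_singleton_eq_map, PySem.List.foldl_append_singleton_eq_map]
  simp only [List.nil_append, List.map_map]
  apply List.map_congr_left
  intro jN hjN
  have hj : jN < matrix.length := List.mem_range.mp hjN
  simp only [Function.comp_apply]
  -- the two minors coincide
  have hsubA : get_submatrix matrix (iN : Int) (jN : Int)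
      = (matrix.eraseIdx iN).map (fun row => row.eraseIdx jN) := pvGetSub matrix iN jN hi
  have hsubB : (PySem.List.slice matrix none (some (iN : Int)) ++
        PySem.List.slice matrix (some ((iN : Int) + 1)) none).map
        (fun row => PySem.List.slice row none (some (jN : Int)) ++
          PySem.List.slice row (some ((jN : Int) + 1)) none)
      = (matrix.eraseIdx iN).map (fun row => row.eraseIdx jN) := by
    rw [pvSliceErase matrix iN]
    exact List.map_congr_left (fun row _ => pvSliceErase row jN)
  rw [hsubA, hsubB]
  set E := (matrix.eraseIdx iN).map (fun row => row.eraseIdx jN) with hE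
  by_cases hunit : module = 1 ∨ module = -1
  · show Int.fmod _ module = Int.fmod _ module
    rw [pvFmod_unit _ _ hunit, pvFmod_unit _ _ hunit]
  · -- here matrix.length ≠ 1 (else D_ would hold), and module ≠ 0 by Pre_
    have hn1 : matrix.length ≠ 1 := by
      intro h1
      exact hND ⟨h1, fun h => hunit (Or.inl h), fun h => hunit (Or.inr h)⟩
    have hn2 : 2 ≤ matrix.length := by omega
    have hEne : E ≠ [] := by
      have : E.length = matrix.length - 1 := by
        rw [hE, List.length_map, List.length_eraseIdx, if_pos hi]
      intro hnil
      rw [hnil] at this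
      simp at this
      omega
    have hEw : ∀ row ∈ E, E.length ≤ row.length := by
      intro row hrow
      rw [hE] at hrow
      rcases List.mem_map.mp hrow with ⟨row0, hrow0, rfl⟩
      have hrow0m : row0 ∈ matrix := List.mem_of_mem_eraseIdx hrow0
      have hw0 : matrix.length ≤ row0.length := hPre.2 row0 hrow0m
      rw [hE, List.length_map, List.length_eraseIdx, if_pos hi, List.length_eraseIdx,
        if_pos (by omega)]
      omega
    have hdetA : determinant E module = Int.fmod (exactDet E) module := by
      rw [determinant]
      exact pvDetFuel E.length E module (le_refl _) hEne hEw
    have hdetB : detDP E module = Int.fmod (exactDet E) module := pvDetDP E module hEne hEw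
    rw [hdetA, hdetB]
    show Int.fmod _ module = Int.fmod _ module
    split
    · rw [one_mul]
    · rw [neg_one_mul]

-- ===== VERDICT (by name: the statement is the Claim_ definition above) =====
theorem matrix_co_factor_spec : Claim_unchanged_matrix_co_factor := by
  intro matrix module _ hPre hND
  exact pvMain matrix module hPre hND

theorem matrix_co_factor_changed : Claim_changed_matrix_co_factor := by
  unfold Claim_changed_matrix_co_factor; decide

theorem matrix_co_factor_tight : Claim_exact_matrix_co_factor := by
  intro matrix module _ hPre hD
  obtain ⟨h1, hm1, hm2⟩ := hD
  obtain ⟨row, rfl⟩ := List.length_eq_one_iff.mp h1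
  have hA : matrix_co_factor [row] module = [[0]] := by
    simp [matrix_co_factor, determinant, detFuel, get_submatrix,
      PySem.List.enumerate_cons, PySem.List.enumerate_nil, PySem.Int.mod,
      PySem.List.pyRange_one, Int.zero_fmod]
  have hdet0 : detDP ([] : List (List Int)) module = 1 := by
    norm_num [detDP, pyPow2, PySem.List.pyRange_one, PySem.List.pySetD_of_nonneg,
      PySem.List.pyGetD_zero]
  have hs1 : PySem.List.slice ([row] : List (List Int)) none (some (0 : Int)) = [] := by
    rw [PySem.List.slice_to _ (by omega)]
    simp
  have hs2 : PySem.List.slice ([row] : List (List Int)) (some (1 : Int)) none = [] := by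
    rw [PySem.List.slice_from _ (by omega)]
    simp
  have hB : matrix_co_factor_alt [row] module = [[Int.fmod 1 module]] := by
    simp [matrix_co_factor_alt, PySem.List.pyRange_one, hs1, hs2, hdet0, PySem.Int.mod]
  rw [hA, hB]
  intro heq
  have h0 : (0 : Int) = Int.fmod 1 module := by simpa using heq
  have hdvd : module ∣ 1 := (PySem.Int.mod_eq_zero_iff_dvd 1 module).mp h0.symm
  rcases Int.isUnit_iff.mp (isUnit_of_dvd_one hdvd) with h | h
  · exact hm1 h
  · exact hm2 h
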